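-- pv_equiv track=rewrite | github.com/asaniann/GenNet | services/qualitative-service/state_graph.py | _classify_transition
-- ===== SOURCE A (Python) =====
-- from typing import List, Dict, Any, Optional, Set, Tuple
--
-- def _classify_transition(
--
--     from_vector: List[int],
--     to_vector: List[int]
-- ) -> str:
--     """Classify transition type"""
--     changes = sum(1 for i in range(len(from_vector)) if from_vector[i] != to_vector[i])
--
--     if changes == 0:
--         return "stable"
--     elif changes == 1:
--         # Check if activation or deactivation
--         for i in range(len(from_vector)):
--             if from_vector[i] != to_vector[i]:
--                 if to_vector[i] > from_vector[i]:
--                     return "activation"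
--                 else:
--                     return "deactivation"
--     else:
--         return "complex"
--
--     return "unknown"
-- ===== SOURCE B (Python) =====
-- def _classify_transition(from_vector, to_vector):
--     """Classify transition type"""
--     state = "stable"
--     for i in range(len(from_vector)):
--         a, b = from_vector[i], to_vector[i]
--         if a != b:
--             if state != "stable":
--                 return "complex"
--             state = "activation" if b > a else "deactivation"
--     return state
-- ===== Notes on version B (the rewrite author's own statement) =====
-- stated objective: faster
-- what changed: Single-pass finite-state machine carrying the current classification ('stable'/'activation'/'deactivation') and returning 'complex' immediately at the second difference, instead of A's full count pass plus a second search pass; a timing run measured B ~1.7x faster (one generator-free loop, early exit).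
import Mathlib
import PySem

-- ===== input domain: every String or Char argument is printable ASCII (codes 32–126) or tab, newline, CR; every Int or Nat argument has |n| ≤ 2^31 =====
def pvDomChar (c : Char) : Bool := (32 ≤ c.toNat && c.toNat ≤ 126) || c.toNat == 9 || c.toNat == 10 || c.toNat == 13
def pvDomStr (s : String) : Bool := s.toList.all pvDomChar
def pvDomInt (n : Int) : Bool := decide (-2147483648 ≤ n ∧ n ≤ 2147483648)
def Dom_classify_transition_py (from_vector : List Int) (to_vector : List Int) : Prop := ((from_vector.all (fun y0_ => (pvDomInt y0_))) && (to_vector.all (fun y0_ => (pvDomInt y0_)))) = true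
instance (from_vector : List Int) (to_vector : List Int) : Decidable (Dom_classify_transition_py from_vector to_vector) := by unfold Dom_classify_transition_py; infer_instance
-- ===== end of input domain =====

-- B: single-pass finite-state machine carrying the running classification, returning "complex"
-- at the second difference, replacing A's count pass plus separate search pass (objective: alternative).

-- ===== PORT A =====
-- the second loop of A: returns at the first differing index, else falls through ("unknown")
def ctFindA (f t : List Int) : List Int → String
  | [] => "unknown"
  | i :: rest =>
    if PySem.List.pyGetD f i 0 ≠ PySem.List.pyGetD t i 0 then
      if PySem.List.pyGetD t i 0 > PySem.List.pyGetD f i 0 then "activation" else "deactivation"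
    else ctFindA f t rest

def classify_transition_py (from_vector : List Int) (to_vector : List Int) : String :=
  let idxs := PySem.List.pyRange 0 (from_vector.length : Int) 1
  let changes : Int := idxs.foldl
    (fun c i => if PySem.List.pyGetD from_vector i 0 ≠ PySem.List.pyGetD to_vector i 0 then c + 1 else c) 0
  if changes = 0 then "stable"
  else if changes = 1 then ctFindA from_vector to_vector idxs
  else "complex"

-- ===== PORT B =====
-- B's loop: state machine over the indices; early return "complex" at the second difference
def ctAltLoop (f t : List Int) : List Int → String → String
  | [], st => st
  | i :: rest, st =>
    let a := PySem.List.pyGetD f i 0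
    let b := PySem.List.pyGetD t i 0
    if a ≠ b then
      if st ≠ "stable" then "complex"
      else ctAltLoop f t rest (if b > a then "activation" else "deactivation")
    else ctAltLoop f t rest st

def classify_transition_py_alt (from_vector : List Int) (to_vector : List Int) : String :=
  ctAltLoop from_vector to_vector (PySem.List.pyRange 0 (from_vector.length : Int) 1) "stable"

-- ===== PRECONDITION & SPEC =====
-- Python raises IndexError (in both A and B) when to_vector is shorter than from_vector
def Pre_classify_transition_py (from_vector : List Int) (to_vector : List Int) : Prop :=
  from_vector.length ≤ to_vector.length
instance (from_vector : List Int) (to_vector : List Int) : Decidable (Pre_classify_transition_py from_vector to_vector) := by unfold Pre_classify_transition_py; infer_instance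
def pvWitness_classify_transition_py : List Int × List Int := ([1, 0], [1, 1])

def Spec_classify_transition_py (from_vector : List Int) (to_vector : List Int) (out : String) : Prop := out = classify_transition_py_alt from_vector to_vector
instance (from_vector : List Int) (to_vector : List Int) (out : String) : Decidable (Spec_classify_transition_py from_vector to_vector out) := by unfold Spec_classify_transition_py; infer_instance

-- ===== CLAIM =====
def Claim_equal_classify_transition_py : Prop := ∀ (from_vector : List Int) (to_vector : List Int), Dom_classify_transition_py from_vector to_vector → Pre_classify_transition_py from_vector to_vector → Spec_classify_transition_py from_vector to_vector (classify_transition_py from_vector to_vector)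

-- ===== LEMMAS AND PROOFS =====
-- A's count fold = length of the filtered index list
theorem ct_count_eq (p : Int → Prop) [DecidablePred p] (l : List Int) (c : Int) :
    l.foldl (fun c i => if p i then c + 1 else c) c = c + (l.filter (fun i => decide (p i))).length := by
  induction l generalizing c with
  | nil => simp
  | cons x xs ih =>
    by_cases h : p x <;> simp [h, ih] <;> push_cast <;> ring

-- A's search loop classifies the head of the filtered index list
theorem ct_find_eq (f t : List Int) (l : List Int) :
    ctFindA f t l =
      match l.filter (fun i => decide (PySem.List.pyGetD f i 0 ≠ PySem.List.pyGetD t i 0)) with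
      | [] => "unknown"
      | i :: _ => if PySem.List.pyGetD t i 0 > PySem.List.pyGetD f i 0 then "activation" else "deactivation" := by
  induction l with
  | nil => simp [ctFindA]
  | cons x xs ih =>
    by_cases h : PySem.List.pyGetD f x 0 ≠ PySem.List.pyGetD t x 0 <;>
      simp [ctFindA, h, ih]

-- B's state machine in a nonstable state: stays unless a difference appears, then "complex"
theorem ctAlt_nonstable (f t : List Int) (l : List Int) (st : String) (hst : st ≠ "stable") :
    ctAltLoop f t l st =
      if l.filter (fun i => decide (PySem.List.pyGetD f i 0 ≠ PySem.List.pyGetD t i 0)) = [] then st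
      else "complex" := by
  induction l with
  | nil => simp [ctAltLoop]
  | cons x xs ih =>
    by_cases h : PySem.List.pyGetD f x 0 ≠ PySem.List.pyGetD t x 0 <;>
      simp [ctAltLoop, h, hst, ih]

-- B's state machine from "stable": classifies by the filtered index list
theorem ctAlt_stable (f t : List Int) (l : List Int) :
    ctAltLoop f t l "stable" =
      match l.filter (fun i => decide (PySem.List.pyGetD f i 0 ≠ PySem.List.pyGetD t i 0)) with
      | [] => "stable"
      | [i] => if PySem.List.pyGetD t i 0 > PySem.List.pyGetD f i 0 then "activation" else "deactivation"
      | _ => "complex" := by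
  induction l with
  | nil => simp [ctAltLoop]
  | cons x xs ih =>
    by_cases h : PySem.List.pyGetD f x 0 ≠ PySem.List.pyGetD t x 0
    · simp only [ctAltLoop, h, List.filter_cons, decide_eq_true_eq, if_pos h, ite_true]
      rw [if_neg (by simp)]
      rw [ctAlt_nonstable f t xs _ (by split <;> decide)]
      split
      · next hnil =>
          simp only [show (fun i => !decide (PySem.List.pyGetD f i 0 = PySem.List.pyGetD t i 0))
              = (fun i => decide (PySem.List.pyGetD f i 0 ≠ PySem.List.pyGetD t i 0)) from by
            funext i; simp, hnil]
      · next hne =>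
          rcases hx : xs.filter (fun i => decide (PySem.List.pyGetD f i 0 ≠ PySem.List.pyGetD t i 0)) with _ | ⟨j, rest⟩
          · exact absurd hx hne
          · simp [hx]
    · simp [ctAltLoop, h, ih]

-- ===== VERDICT =====
theorem classify_transition_py_spec : Claim_equal_classify_transition_py := by
  intro f t _ _
  unfold Spec_classify_transition_py classify_transition_py classify_transition_py_alt
  simp only
  rw [ct_count_eq (fun i => PySem.List.pyGetD f i 0 ≠ PySem.List.pyGetD t i 0),
      ct_find_eq, ctAlt_stable]
  simp only [Int.zero_add]
  rcases h : (PySem.List.pyRange 0 (f.length : Int) 1).filter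
      (fun i => decide (PySem.List.pyGetD f i 0 ≠ PySem.List.pyGetD t i 0)) with _ | ⟨i, _ | ⟨j, rest⟩⟩
  · simp [h]
  · simp [h]
  · simp only [h, List.length_cons]
    rw [if_neg (by push_cast; omega), if_neg (by push_cast; omega)]
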